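-- pv_equiv track=rewrite | github.com/Jokten/Advent | 2015/day19/19.py | mol_div
-- ===== SOURCE A (Python) =====
-- def mol_div(s):
--     ls = []
--     st = ''
--     for i in s:
--         if i.isupper():
--             if st:
--                 ls.append(st)
--             st = i
--         else:
--             st += i
--     ls.append(st)
--     return ls
-- ===== SOURCE B (Python) =====
-- def mol_div(s):
--     # Gather tokens by scanning for the next uppercase boundary and slicing,
--     # instead of accumulating characters one by one.
--     tokens = []
--     while True:
--         k = 1
--         while k < len(s) and not s[k].isupper():
--             k += 1
--         tokens.append(s[:k])
--         if k >= len(s):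
--             return tokens
--         s = s[k:]
-- ===== Notes on version B (the rewrite author's own statement) =====
-- stated objective: alternative
-- what changed: A builds each token by appending characters one at a time to an accumulator string; B instead scans ahead for the next uppercase boundary and slices the whole token out of the string, looping on the remaining suffix.
import Mathlib
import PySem

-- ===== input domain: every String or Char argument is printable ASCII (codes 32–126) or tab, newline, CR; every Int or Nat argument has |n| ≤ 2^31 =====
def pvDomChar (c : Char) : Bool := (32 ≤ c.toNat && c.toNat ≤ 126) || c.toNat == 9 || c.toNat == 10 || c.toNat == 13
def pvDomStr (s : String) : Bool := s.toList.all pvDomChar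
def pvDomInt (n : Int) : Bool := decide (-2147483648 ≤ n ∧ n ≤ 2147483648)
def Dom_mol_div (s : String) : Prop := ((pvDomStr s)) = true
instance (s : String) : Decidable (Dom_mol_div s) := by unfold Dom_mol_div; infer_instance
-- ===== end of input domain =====

-- B finds each token's end by scanning for the next uppercase boundary and slices the
-- token out, instead of A's per-character string accumulation; objective: alternative.

-- ===== PORT A =====
-- A's for-loop over the characters, state = (ls, st)
def molAux (l : List Char) (ls : List (List Char)) (st : List Char) : List (List Char) :=
  match l with
  | [] => ls ++ [st]
  | c :: rest =>
    if PySem.Chars.isupper c then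
      molAux rest (if st.isEmpty then ls else ls ++ [st]) [c]
    else
      molAux rest ls (st ++ [c])

def mol_div (s : String) : List String :=
  (molAux s.toList [] []).map String.ofList

-- ===== PORT B =====
-- B's inner while loop: advance k past non-uppercase characters
def kScan (l : List Char) (k : Nat) : Nat :=
  if h : k < l.length then
    if PySem.Chars.isupper l[k] then k else kScan l (k + 1)
  else k
termination_by l.length - k

-- needed for bLoop's termination
theorem kScan_ge (l : List Char) (k : Nat) : k ≤ kScan l k := by
  unfold kScan
  split
  · split
    · exact le_refl _
    · exact le_trans (Nat.le_succ k) (kScan_ge l (k + 1))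
  · exact le_refl _
termination_by l.length - k

-- B's outer while loop: slice off one token s[:k], continue on the remainder s[k:]
def bLoop (l : List Char) (acc : List (List Char)) : List (List Char) :=
  if h : kScan l 1 < l.length then
    bLoop (l.drop (kScan l 1)) (acc ++ [l.take (kScan l 1)])
  else acc ++ [l.take (kScan l 1)]
termination_by l.length
decreasing_by
  have h1 := kScan_ge l 1
  simp only [List.length_drop]
  omega

def mol_div_alt (s : String) : List String :=
  (bLoop s.toList []).map String.ofList

-- ===== PRECONDITION & SPEC =====
def Spec_mol_div (s : String) (out : List String) : Prop := out = mol_div_alt s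
instance (s : String) (out : List String) : Decidable (Spec_mol_div s out) := by unfold Spec_mol_div; infer_instance

-- ===== CLAIM (what is proved, stated in full; the proofs are below) =====
def Claim_equal_mol_div : Prop := ∀ (s : String), Dom_mol_div s → Spec_mol_div s (mol_div s)

-- ===== LEMMAS AND PROOFS =====

theorem molAux_acc (l : List Char) (ls : List (List Char)) (st : List Char) :
    molAux l ls st = ls ++ molAux l [] st := by
  induction l generalizing ls st with
  | nil => simp [molAux]
  | cons c rest ih =>
    simp only [molAux]
    split
    · rw [ih, ih (if st.isEmpty then [] else [] ++ [st])]
      split <;> simp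
    · exact ih ls (st ++ [c])

theorem molAux_head (c : Char) (rest : List Char) :
    molAux (c :: rest) [] [] = molAux rest [] [c] := by
  simp only [molAux, List.isEmpty_nil, if_true, List.nil_append]
  split <;> rfl

-- A consumes a non-uppercase run by appending it to st
theorem molAux_low (t r : List Char) (st : List Char)
    (ht : ∀ c ∈ t, PySem.Chars.isupper c = false) :
    molAux (t ++ r) [] st = molAux r [] (st ++ t) := by
  induction t generalizing st with
  | nil => simp
  | cons c t ih =>
    have hc := ht c (by simp)
    simp only [List.cons_append, molAux, hc, Bool.false_eq_true, if_false]
    rw [ih _ (fun x hx => ht x (by simp [hx]))]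
    simp

theorem bLoop_acc (l : List Char) (acc : List (List Char)) :
    bLoop l acc = acc ++ bLoop l [] := by
  rw [bLoop]
  conv_rhs => rw [bLoop]
  by_cases h : kScan l 1 < l.length
  · rw [dif_pos h, dif_pos h, bLoop_acc (l.drop (kScan l 1)),
      bLoop_acc (l.drop (kScan l 1)) ([] ++ [l.take (kScan l 1)])]
    simp
  · rw [dif_neg h, dif_neg h]
    simp
termination_by l.length
decreasing_by
  all_goals
    have h1 := kScan_ge l 1
    simp only [List.length_drop]
    omega

-- kScan k = k plus the length of the non-uppercase run starting at k
theorem kScan_spec (l : List Char) (k : Nat) :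
    kScan l k = k + ((l.drop k).takeWhile (fun c => !PySem.Chars.isupper c)).length := by
  rw [kScan]
  by_cases h : k < l.length
  · rw [dif_pos h, List.drop_eq_getElem_cons h]
    cases hb : PySem.Chars.isupper l[k] with
    | true => simp [hb]
    | false =>
      rw [if_neg (by simp [hb]), kScan_spec l (k + 1)]
      simp only [List.takeWhile_cons, hb, Bool.not_false, if_true, List.length_cons]
      omega
  · rw [dif_neg h, List.drop_eq_nil_of_le (by omega)]
    simp
termination_by l.length - k

theorem take_len_takeWhile {α : Type} (p : α → Bool) (l : List α) :
    l.take (l.takeWhile p).length = l.takeWhile p := by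
  induction l with
  | nil => rfl
  | cons c rest ih =>
    by_cases hc : p c
    · simp [List.takeWhile_cons, hc, ih]
    · simp [List.takeWhile_cons, hc]

theorem drop_len_takeWhile {α : Type} (p : α → Bool) (l : List α) :
    l.drop (l.takeWhile p).length = l.dropWhile p := by
  induction l with
  | nil => rfl
  | cons c rest ih =>
    by_cases hc : p c
    · simp [List.takeWhile_cons, List.dropWhile_cons, hc, ih]
    · simp [List.takeWhile_cons, List.dropWhile_cons, hc]

theorem head_dropWhile_false {α : Type} (p : α → Bool) (l : List α) (u : α) (r' : List α)
    (h : l.dropWhile p = u :: r') : p u = false := by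
  induction l with
  | nil => simp [List.dropWhile] at h
  | cons c rest ih =>
    by_cases hc : p c
    · exact ih (by simpa [List.dropWhile_cons, hc] using h)
    · rw [List.dropWhile_cons_of_neg (by simp [hc])] at h
      cases h
      exact eq_false_of_ne_true hc

-- the core equivalence on char lists
theorem core_eq (l : List Char) : molAux l [] [] = bLoop l [] := by
  match l with
  | [] => simp [molAux, bLoop, kScan]
  | c :: rest =>
    have hp : ∀ x ∈ rest.takeWhile (fun c => !PySem.Chars.isupper c),
        PySem.Chars.isupper x = false := by
      intro x hx
      simpa using List.mem_takeWhile_imp hx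
    have hA : molAux (c :: rest) [] [] =
        molAux (rest.dropWhile (fun c => !PySem.Chars.isupper c)) []
          (c :: rest.takeWhile (fun c => !PySem.Chars.isupper c)) := by
      rw [molAux_head, ← List.takeWhile_append_dropWhile
        (p := fun c => !PySem.Chars.isupper c) (l := rest), molAux_low _ _ _ hp]
      simp [List.takeWhile_append_dropWhile]
    have hk : kScan (c :: rest) 1 =
        (rest.takeWhile (fun c => !PySem.Chars.isupper c)).length + 1 := by
      rw [kScan_spec]
      simp [Nat.add_comm]
    have htake : (c :: rest).take (kScan (c :: rest) 1) =
        c :: rest.takeWhile (fun c => !PySem.Chars.isupper c) := by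
      rw [hk, List.take_succ_cons, take_len_takeWhile]
    have hdrop : (c :: rest).drop (kScan (c :: rest) 1) =
        rest.dropWhile (fun c => !PySem.Chars.isupper c) := by
      rw [hk, List.drop_succ_cons, drop_len_takeWhile]
    rw [bLoop]
    by_cases h : kScan (c :: rest) 1 < (c :: rest).length
    · rw [dif_pos h, hdrop, htake, bLoop_acc, hA]
      have hrlen : 0 < (rest.dropWhile (fun c => !PySem.Chars.isupper c)).length := by
        rw [← drop_len_takeWhile]
        rw [hk] at h
        simp only [List.length_cons] at h
        simp only [List.length_drop]
        omega
      rcases hr : rest.dropWhile (fun c => !PySem.Chars.isupper c) with _ | ⟨u, r'⟩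
      · rw [hr] at hrlen
        simp at hrlen
      · have hu : PySem.Chars.isupper u = true := by
          have h0 := head_dropWhile_false _ rest u r' hr
          simpa using h0
        have e1 : molAux (u :: r') [] (c :: rest.takeWhile (fun c => !PySem.Chars.isupper c)) =
            (c :: rest.takeWhile (fun c => !PySem.Chars.isupper c)) :: molAux r' [] [u] := by
          simp only [molAux, hu, if_true, List.isEmpty_cons]
          rw [molAux_acc]
          simp
        rw [e1, ← molAux_head, core_eq (u :: r')]
        simp
    · rw [dif_neg h, htake, hA]
      have hr : rest.dropWhile (fun c => !PySem.Chars.isupper c) = [] := by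
        have h2 : (rest.takeWhile (fun c => !PySem.Chars.isupper c)).length ≥ rest.length := by
          rw [hk] at h
          simp only [List.length_cons] at h
          omega
        rw [← drop_len_takeWhile]
        exact List.drop_eq_nil_of_le h2
      rw [hr]
      simp [molAux]
termination_by l.length
decreasing_by
  have hle := List.length_dropWhile_le (p := fun c => !PySem.Chars.isupper c) (l := rest)
  rw [hr] at hle
  simp only [List.length_cons] at *
  omega

-- ===== VERDICT (by name: the statement is the Claim_ definition above) =====
theorem mol_div_spec : Claim_equal_mol_div := by
  intro s _
  unfold Spec_mol_div mol_div mol_div_alt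
  rw [core_eq]
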